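-- pv_equiv track=rewrite | github.com/xidchen/beta_data | beta_coach.py | get_focus_left_indices
-- ===== SOURCE A (Python) =====
-- def get_focus_left_indices(transcript: str, context_l: str) -> {int}:
--     """Get the left indices of focus on transcript based on the left context,
--     which is matched with the transcript from full length to rightmost one
--     :param transcript: user's ASR result without punctuation and whitespace
--     :param context_l: the left context of a keyword on rhetoric
--     :return: the left indices of the focus
--     """
--     focus_l_indices = set()
--     for i in range(len(context_l), 0, -1):
--         c = context_l[-i:]
--         c_count = transcript.count(c)
--         start, end = 0, len(transcript)
--         for _ in range(c_count):
--             focus_l_index = transcript.find(c, start, end) + len(c)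
--             focus_l_indices.add(focus_l_index)
--             start = focus_l_index
--     if not focus_l_indices:
--         for i in range(len(context_l), 1, -1):
--             for j in range(1, i - 1):
--                 c = context_l[-i:-j]
--                 c_count = transcript.count(c)
--                 start, end = 0, len(transcript)
--                 for _ in range(c_count):
--                     focus_l_index = transcript.find(c, start, end) + len(c)
--                     focus_l_indices.add(focus_l_index)
--                     start = focus_l_index
--     focus_l_indices.add(0)
--     return focus_l_indices
-- ===== SOURCE B (Python) =====
-- # B: no string searching at all -- one dynamic-programming pass builds the table
-- # rows[e][q] = length of the longest common suffix of transcript[:e] and context_l[:q];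
-- # each candidate substring context_l[q-L:q] then gets its greedy non-overlapping match
-- # ends by a linear scan of column q of that table (end e matches iff rows[e][q] >= L).
-- def get_focus_left_indices(transcript, context_l):
--     m = len(context_l)
--     row = [0] * (m + 1)
--     rows = [row]
--     for ch in transcript:
--         row = [0] + [v + 1 if ch == c else 0 for c, v in zip(context_l, row)]
--         rows.append(row)
--
--     def greedy(length, q):
--         ends, last = [], 0
--         for e, r in enumerate(rows):
--             if e >= length and r[q] >= length and e - length >= last:
--                 ends.append(e)
--                 last = e
--         return ends
--
--     ends = [e for i in range(m, 0, -1) for e in greedy(i, m)]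
--     if not ends:
--         ends = [e for i in range(m, 1, -1) for j in range(1, i - 1)
--                 for e in greedy(i - j, m - j)]
--     ends.append(0)
--     return set(ends)
-- ===== Notes on version B (the rewrite author's own statement) =====
-- stated objective: alternative
-- what changed: A searches the transcript with str.count plus repeated str.find for every candidate substring; B does no string searching at all: it builds once, by dynamic programming, the table rows[e][q] = longest common suffix length of transcript[:e] and context_l[:q], and each candidate context_l[q-L:q] gets its greedy non-overlapping match ends by one linear scan of column q of that table (end e matches iff rows[e][q] >= L).
import Mathlib
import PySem

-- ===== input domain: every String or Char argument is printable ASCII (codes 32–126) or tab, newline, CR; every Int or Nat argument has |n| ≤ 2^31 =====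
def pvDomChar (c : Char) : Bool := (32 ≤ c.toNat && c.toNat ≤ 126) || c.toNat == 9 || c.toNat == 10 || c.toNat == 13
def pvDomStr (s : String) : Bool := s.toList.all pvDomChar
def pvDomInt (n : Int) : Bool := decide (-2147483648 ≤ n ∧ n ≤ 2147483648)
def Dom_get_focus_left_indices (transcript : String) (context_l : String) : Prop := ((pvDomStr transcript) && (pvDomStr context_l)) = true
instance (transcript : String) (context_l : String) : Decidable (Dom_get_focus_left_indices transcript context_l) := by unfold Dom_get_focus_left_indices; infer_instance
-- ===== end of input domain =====

-- B replaces all of A's string searching (str.count + repeated str.find per candidate) with one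
-- DP table of longest-common-suffix lengths plus a linear greedy scan of a table column per
-- candidate (objective: alternative).


-- ===== PORT A =====
-- body of A's inner 'for _ in range(c_count)' loop
def pvStepA (t c : List Char) (p : PySem.Set Int × Int) : PySem.Set Int × Int :=
  let idx := PySem.Chars.findFrom t c p.2 (some (t.length : Int)) + (c.length : Int)
  (PySem.Set.add p.1 idx, idx)

-- A's inner loop: 'start, end = 0, len(transcript); for _ in range(c_count): …'
def pvFindLoopA (t c : List Char) (cnt : Nat) (fs : PySem.Set Int) (start : Int) : PySem.Set Int × Int :=
  (PySem.List.pyRange 0 (cnt : Int) 1).foldl (fun p _ => pvStepA t c p) (fs, start)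

def get_focus_left_indices (transcript : String) (context_l : String) : List Int :=
  let t := transcript.toList
  let cl := context_l.toList
  let s1 : PySem.Set Int :=
    (PySem.List.pyRange (cl.length : Int) 0 (-1)).foldl
      (fun (fs : PySem.Set Int) (i : Int) =>
        let c := PySem.List.slice cl (some (-i)) none
        let c_count := PySem.Chars.count t c
        (pvFindLoopA t c c_count fs 0).1)
      PySem.Set.empty
  let s2 : PySem.Set Int :=
    if s1.isEmpty then
      (PySem.List.pyRange (cl.length : Int) 1 (-1)).foldl
        (fun (fs : PySem.Set Int) (i : Int) =>
          (PySem.List.pyRange 1 (i - 1) 1).foldl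
            (fun (fs2 : PySem.Set Int) (j : Int) =>
              let c := PySem.List.slice cl (some (-i)) (some (-j))
              let c_count := PySem.Chars.count t c
              (pvFindLoopA t c c_count fs2 0).1)
            fs)
        s1
    else s1
  PySem.Set.add s2 0

-- ===== PORT B =====
-- 'row = [0] + [v + 1 if ch == c else 0 for c, v in zip(context_l, row)]'
def pvNextRow (cl : List Char) (row : List Nat) (ch : Char) : List Nat :=
  0 :: List.zipWith (fun c v => if ch = c then v + 1 else 0) cl row

-- B's greedy(length, q): 'for e, r in enumerate(rows): if e >= length and r[q] >= length
-- and e - length >= last: ends.append(e); last = e' — r[q] is always in range (rows have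
-- length m+1 and q ≤ m), ported as getD q 0
def pvGreedy (rows : List (List Nat)) (L q : Nat) : List Int :=
  ((PySem.List.enumerate rows 0).foldl
    (fun (p : List Int × Int) (er : Int × List Nat) =>
      if (L : Int) ≤ er.1 ∧ (L : Int) ≤ ((er.2.getD q 0 : Nat) : Int) ∧ p.2 ≤ er.1 - (L : Int)
      then (p.1 ++ [er.1], er.1) else p)
    ([], 0)).1

def get_focus_left_indices_alt (transcript : String) (context_l : String) : List Int :=
  let t := transcript.toList
  let cl := context_l.toList
  let m := cl.length
  -- 'rows = [row]; for ch in transcript: row = …; rows.append(row)'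
  let rows := List.scanl (pvNextRow cl) (List.replicate (m + 1) 0) t
  let ends1 := (PySem.List.pyRange (m : Int) 0 (-1)).flatMap (fun i => pvGreedy rows i.toNat m)
  let ends :=
    if ends1.isEmpty then
      (PySem.List.pyRange (m : Int) 1 (-1)).flatMap (fun i =>
        (PySem.List.pyRange 1 (i - 1) 1).flatMap (fun j =>
          pvGreedy rows (i - j).toNat ((m : Int) - j).toNat))
    else ends1
  PySem.Set.ofList (ends ++ [0])

-- ===== PRECONDITION & SPEC =====
def Spec_get_focus_left_indices (transcript : String) (context_l : String) (out : List Int) : Prop := out = get_focus_left_indices_alt transcript context_l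
instance (transcript : String) (context_l : String) (out : List Int) : Decidable (Spec_get_focus_left_indices transcript context_l out) := by unfold Spec_get_focus_left_indices; infer_instance

-- ===== CLAIM (what is proved, stated in full; the proofs are below) =====
def Claim_equal_get_focus_left_indices : Prop := ∀ (transcript : String) (context_l : String), Dom_get_focus_left_indices transcript context_l → Spec_get_focus_left_indices transcript context_l (get_focus_left_indices transcript context_l)

-- ===== LEMMAS AND PROOFS =====

-- proof-side reference scan: greedy non-overlapping match ends as Nat positions
def pvScanGo (c : List Char) : Nat → List Char → Nat → List Nat
  | 0, _, _ => []
  | _ + 1, [], _ => []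
  | f + 1, h :: tt, pos =>
      if c.isPrefixOf (h :: tt) then
        (pos + c.length) :: pvScanGo c f (List.drop c.length (h :: tt)) (pos + c.length)
      else pvScanGo c f tt (pos + 1)

def pvScanEnds (t c : List Char) : List Int :=
  (pvScanGo c t.length t 0).map (fun x => (x : Int))

-- common prefix length (applied to reversed lists: common suffix length)
def pvCpl : List Char → List Char → Nat
  | x :: xs, y :: ys => if x = y then pvCpl xs ys + 1 else 0
  | _, _ => 0

-- the DP row for the transcript prefix a
def pvRowOf (a cl : List Char) : List Nat :=
  (List.range (cl.length + 1)).map (fun q => pvCpl a.reverse ((cl.take q).reverse))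

-- proof-side greedy selection over candidate end positions
def pvSel (t c : List Char) (L : Nat) : List Nat → Nat → List Nat
  | [], _ => []
  | e :: es, last =>
      if L ≤ e ∧ c.isPrefixOf (t.drop (e - L)) ∧ last ≤ e - L
      then e :: pvSel t c L es e else pvSel t c L es last

-- a fold that ignores the elements is an iterate
lemma pv_foldl_const {α β : Type} (l : List β) (g : α → α) (init : α) :
    l.foldl (fun p _ => g p) init = g^[l.length] init := by
  induction l generalizing init with
  | nil => rfl
  | cons x xs ih => simp [List.foldl_cons, ih, Function.iterate_succ_apply]

-- the fuel of pvScanGo is irrelevant once it covers the remaining length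
lemma pvScanGo_fuel (c : List Char) (hc : c ≠ []) :
    ∀ (fuel fuel' : Nat) (rest : List Char) (pos : Nat), rest.length ≤ fuel → rest.length ≤ fuel' →
      pvScanGo c fuel rest pos = pvScanGo c fuel' rest pos := by
  have hcl : 0 < c.length := List.length_pos_of_ne_nil hc
  intro fuel
  induction fuel with
  | zero =>
    intro fuel' rest pos h1 h2
    have : rest = [] := List.eq_nil_of_length_eq_zero (Nat.le_zero.mp h1)
    subst this
    cases fuel' <;> simp [pvScanGo]
  | succ f ih =>
    intro fuel' rest pos h1 h2
    cases fuel' with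
    | zero =>
      have : rest = [] := List.eq_nil_of_length_eq_zero (Nat.le_zero.mp h2)
      subst this; simp [pvScanGo]
    | succ f' =>
      cases rest with
      | nil => simp [pvScanGo]
      | cons h tt =>
        simp only [pvScanGo]
        split
        · rw [ih f' _ _ (by simp only [List.length_drop, List.length_cons] at h1 h2 ⊢; omega) (by simp only [List.length_drop, List.length_cons] at h1 h2 ⊢; omega)]
        · rw [ih f' _ _ (by simp only [List.length_cons] at h1 h2 ⊢; omega) (by simp only [List.length_cons] at h1 h2 ⊢; omega)]

-- Python's str.count counts exactly the greedy matches that pvScanGo records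
lemma pv_count_go (c : List Char) :
    ∀ (fuel : Nat) (rest : List Char) (pos acc : Nat),
      PySem.Chars.count.go c fuel rest acc = acc + (pvScanGo c fuel rest pos).length := by
  intro fuel
  induction fuel with
  | zero =>
    intro rest pos acc
    rw [PySem.Chars.count.go]
    simp [pvScanGo]
  | succ f ih =>
    intro rest pos acc
    cases rest with
    | nil => rw [PySem.Chars.count.go]; simp [pvScanGo]; omega
    | cons h tt =>
      rw [PySem.Chars.count.go]
      simp only [pvScanGo]
      split
      · rw [ih _ (pos + c.length) (acc + 1)]; simp; omega
      · rw [ih _ (pos + 1) acc]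

lemma pv_count_eq (t c : List Char) (hc : c ≠ []) :
    PySem.Chars.count t c = (pvScanGo c t.length t 0).length := by
  have hE : c.isEmpty = false := by cases c with | nil => exact absurd rfl hc | cons a b => rfl
  rw [show PySem.Chars.count t c = PySem.Chars.count.go c t.length t 0 from by
    simp [PySem.Chars.count, hE]]
  rw [pv_count_go c t.length t 0 0]
  simp

lemma pv_findgo_lb (c : List Char) :
    ∀ (s : List Char) (k : Nat), PySem.Chars.find.go c s k = -1 ∨ (k : Int) ≤ PySem.Chars.find.go c s k := by
  intro s
  induction s with
  | nil =>
    intro k; rw [PySem.Chars.find.go]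
    by_cases h : c.isEmpty <;> simp [h]
  | cons x tt ih =>
    intro k; rw [PySem.Chars.find.go]
    split
    · right; simp
    · rcases ih (k + 1) with h | h
      · left; exact h
      · right; omega

lemma pv_findgo_shift (c : List Char) :
    ∀ (s : List Char) (k : Nat), PySem.Chars.find.go c s k =
      if PySem.Chars.find.go c s 0 = -1 then -1 else PySem.Chars.find.go c s 0 + k := by
  intro s
  induction s with
  | nil =>
    intro k
    rw [PySem.Chars.find.go, PySem.Chars.find.go]
    by_cases h : c.isEmpty <;> simp [h]
  | cons x tt ih =>
    intro k
    rw [PySem.Chars.find.go]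
    conv_rhs => rw [PySem.Chars.find.go]
    split
    · simp
    · rw [ih (k + 1), ih 1]
      rcases pv_findgo_lb c tt 0 with h | h
      · simp [h]
      · have hne : PySem.Chars.find.go c tt 0 ≠ -1 := by omega
        simp only [hne, if_false]
        have : ¬ (PySem.Chars.find.go c tt 0 + 1 = -1) := by omega
        simp [this]; ring

lemma pv_find_nil (c : List Char) (hc : c ≠ []) : PySem.Chars.find [] c = -1 := by
  show PySem.Chars.find.go c [] 0 = -1
  rw [PySem.Chars.find.go]
  simp [List.isEmpty_iff, hc]

lemma pv_find_cons (c : List Char) (h : Char) (tt : List Char) :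
    PySem.Chars.find (h :: tt) c =
      if c.isPrefixOf (h :: tt) then 0 else
        (if PySem.Chars.find tt c = -1 then -1 else PySem.Chars.find tt c + 1) := by
  show PySem.Chars.find.go c (h :: tt) 0 = _
  rw [PySem.Chars.find.go]
  split
  · rfl
  · rw [pv_findgo_shift c tt 1]
    rfl

lemma pvScanGo_of_find_neg (c : List Char) (_hc : c ≠ []) :
    ∀ (fuel : Nat) (rest : List Char) (pos : Nat), PySem.Chars.find rest c = -1 →
      pvScanGo c fuel rest pos = [] := by
  intro fuel
  induction fuel with
  | zero => intro rest pos _; simp [pvScanGo]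
  | succ f ih =>
    intro rest pos hfind
    cases rest with
    | nil => simp [pvScanGo]
    | cons h tt =>
      rw [pv_find_cons] at hfind
      have hlb := PySem.Chars.neg_one_le_find tt c
      by_cases h1 : c.isPrefixOf (h :: tt)
      · rw [if_pos h1] at hfind; norm_num at hfind
      · rw [if_neg h1] at hfind
        have h2 : PySem.Chars.find tt c = -1 := by
          by_cases h2 : PySem.Chars.find tt c = -1
          · exact h2
          · rw [if_neg h2] at hfind; omega
        simp only [pvScanGo, h1]
        exact ih tt (pos + 1) h2

lemma pv_find_add_len_le (rest c : List Char) (h : 0 ≤ PySem.Chars.find rest c) :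
    (PySem.Chars.find rest c).toNat + c.length ≤ rest.length := by
  obtain ⟨hpre, -⟩ := PySem.Chars.find_spec h
  have h1 := hpre.length_le
  have h2 := PySem.Chars.find_le_length rest c
  simp [List.length_drop] at h1
  omega

lemma pvScanGo_of_find_nonneg (c : List Char) (hc : c ≠ []) :
    ∀ (rest : List Char) (fuel pos : Nat), rest.length ≤ fuel → 0 ≤ PySem.Chars.find rest c →
      pvScanGo c fuel rest pos =
        (pos + (PySem.Chars.find rest c).toNat + c.length) ::
          pvScanGo c (rest.drop ((PySem.Chars.find rest c).toNat + c.length)).length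
            (rest.drop ((PySem.Chars.find rest c).toNat + c.length))
            (pos + (PySem.Chars.find rest c).toNat + c.length) := by
  have hcl : 0 < c.length := List.length_pos_of_ne_nil hc
  intro rest
  induction rest with
  | nil => intro fuel pos _ h0; rw [pv_find_nil c hc] at h0; omega
  | cons h tt ih =>
    intro fuel pos hfuel h0
    cases fuel with
    | zero => simp at hfuel
    | succ f =>
      have hlen : (h :: tt).length = tt.length + 1 := List.length_cons ..
      by_cases hp : c.isPrefixOf (h :: tt)
      · have hfind : PySem.Chars.find (h :: tt) c = 0 := by rw [pv_find_cons, if_pos hp]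
        rw [hfind]
        simp only [pvScanGo, hp, if_true, Int.toNat_zero, Nat.zero_add, Nat.add_zero]
        congr 1
        apply pvScanGo_fuel c hc
        · simp only [List.length_drop, List.length_cons]; omega
        · rfl
      · have hlb := PySem.Chars.neg_one_le_find tt c
        have hne : PySem.Chars.find tt c ≠ -1 := by
          intro hnil
          rw [pv_find_cons, if_neg hp, if_pos hnil] at h0; norm_num at h0
        have hfind : PySem.Chars.find (h :: tt) c = PySem.Chars.find tt c + 1 := by
          rw [pv_find_cons, if_neg hp, if_neg hne]
        have h0' : 0 ≤ PySem.Chars.find tt c := by omega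
        have hk : (PySem.Chars.find (h :: tt) c).toNat = (PySem.Chars.find tt c).toNat + 1 := by
          rw [hfind]; omega
        rw [hk]
        simp only [pvScanGo, hp]
        rw [ih f (pos + 1) (by omega) h0']
        have hdrop : List.drop ((PySem.Chars.find tt c).toNat + 1 + c.length) (h :: tt)
            = List.drop ((PySem.Chars.find tt c).toNat + c.length) tt := by
          rw [show (PySem.Chars.find tt c).toNat + 1 + c.length
              = ((PySem.Chars.find tt c).toNat + c.length) + 1 by omega]
          rw [List.drop_succ_cons]
        rw [hdrop, show pos + ((PySem.Chars.find tt c).toNat + 1) + c.length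
            = pos + 1 + (PySem.Chars.find tt c).toNat + c.length from by omega]
        simp

lemma pv_findFrom_some (t c : List Char) (pos : Int) :
    PySem.Chars.findFrom t c pos (some (t.length : Int)) = PySem.Chars.findFrom t c pos none := by
  have h0 : ¬ ((t.length : Int) < (t.length : Int)) := lt_irrefl _
  have h1 : ¬ ((t.length : Int) < 0) := by omega
  simp only [PySem.Chars.findFrom, h0, h1, if_false]

-- A's inner find-loop walks exactly the greedy match ends
lemma pv_loopA (t c : List Char) (hc : c ≠ []) :
    ∀ (N pos : Nat), t.length - pos = N → pos ≤ t.length → ∀ (fs : PySem.Set Int),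
      ((pvStepA t c)^[(pvScanGo c (t.length - pos) (t.drop pos) pos).length] (fs, (pos : Int))).1
        = ((pvScanGo c (t.length - pos) (t.drop pos) pos).map (fun x => (x : Int))).foldl
            PySem.Set.add fs := by
  intro N
  induction N using Nat.strong_induction_on with
  | _ N IH =>
    intro pos hN hpos fs
    by_cases hfind : PySem.Chars.find (t.drop pos) c = -1
    · rw [pvScanGo_of_find_neg c hc _ _ _ hfind]
      simp
    · have hlb := PySem.Chars.neg_one_le_find (t.drop pos) c
      have h0 : 0 ≤ PySem.Chars.find (t.drop pos) c := by omega
      have hcl : 0 < c.length := List.length_pos_of_ne_nil hc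
      have hlen : (t.drop pos).length = t.length - pos := by simp [List.length_drop]
      have hkc : (PySem.Chars.find (t.drop pos) c).toNat + c.length ≤ t.length - pos := by
        have := pv_find_add_len_le (t.drop pos) c h0
        omega
      rw [pvScanGo_of_find_nonneg c hc (t.drop pos) (t.length - pos) pos (by omega) h0]
      set k := (PySem.Chars.find (t.drop pos) c).toNat with hkdef
      set ep := pos + k + c.length with he
      have hdrop : (t.drop pos).drop (k + c.length) = t.drop ep := by
        rw [List.drop_drop]; congr 1; omega
      rw [hdrop]
      have hdlen2 : (t.drop ep).length = t.length - ep := by simp [List.length_drop]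
      rw [hdlen2]
      rw [List.length_cons, Function.iterate_succ_apply]
      have hcast : (pos : Int) + PySem.Chars.find (t.drop pos) c + (c.length : Int)
          = ((ep : Nat) : Int) := by
        rw [he]; push_cast; rw [hkdef, Int.toNat_of_nonneg h0]
      have hstep : pvStepA t c (fs, (pos : Int))
          = (PySem.Set.add fs ((ep : Nat) : Int), ((ep : Nat) : Int)) := by
        simp only [pvStepA]
        rw [pv_findFrom_some, PySem.Chars.findFrom_natCast t c pos hpos]
        rw [if_neg hfind]
        rw [hcast]
      rw [hstep]
      have hlt : t.length - ep < N := by omega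
      have hIH := IH (t.length - ep) hlt ep rfl (by omega) (PySem.Set.add fs ((ep : Nat) : Int))
      simpa using hIH

lemma pv_inner (t c : List Char) (hc : c ≠ []) (fs : PySem.Set Int) :
    (pvFindLoopA t c (PySem.Chars.count t c) fs 0).1
      = (pvScanEnds t c).foldl PySem.Set.add fs := by
  unfold pvFindLoopA pvScanEnds
  rw [pv_foldl_const]
  have hlen : (PySem.List.pyRange 0 ((PySem.Chars.count t c : Nat) : Int) 1).length
      = PySem.Chars.count t c := by
    rw [PySem.List.length_pyRange_one]; simp
  rw [hlen, pv_count_eq t c hc]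
  have h := pv_loopA t c hc t.length 0 (by simp) (Nat.zero_le _) fs
  simpa using h

lemma pv_foldl_ends {α : Type} (L : List α) (ends : α → List Int) (s : PySem.Set Int) :
    L.foldl (fun fs c => (ends c).foldl PySem.Set.add fs) s
      = (L.flatMap ends).foldl PySem.Set.add s := by
  induction L generalizing s with
  | nil => rfl
  | cons x xs ih => simp [List.flatMap_cons, List.foldl_append, ih]

lemma pv_ofList_eq_nil_iff (l : List Int) : (l.foldl PySem.Set.add [] = []) ↔ l = [] := by
  constructor
  · intro hfold
    cases l with
    | nil => rfl
    | cons x xs =>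
      exfalso
      have hx : x ∈ (x :: xs).foldl PySem.Set.add ([] : PySem.Set Int) := by
        rw [← PySem.Set.ofList_eq_foldl]
        exact (PySem.Set.mem_ofList _ _).mpr (List.mem_cons_self ..)
      rw [hfold] at hx; simp at hx
  · intro h; subst h; rfl

lemma pv_flatMap_congr {α β : Type} (l : List α) (f g : α → List β)
    (h : ∀ x ∈ l, f x = g x) : l.flatMap f = l.flatMap g := by
  induction l with
  | nil => rfl
  | cons x xs ih =>
    simp only [List.flatMap_cons]
    rw [h x (List.mem_cons_self ..), ih (fun y hy => h y (List.mem_cons_of_mem _ hy))]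

lemma pv_slice_from_eq (cl : List Char) (i : Int) (h1 : 1 ≤ i) (h2 : i ≤ cl.length) :
    PySem.List.slice cl (some (-i)) none = cl.drop (cl.length - i.toNat) := by
  have hcl : PySem.List.clampIdx cl.length (-i) = cl.length - i.toNat := by
    simp only [PySem.List.clampIdx]; split_ifs <;> omega
  simp [PySem.List.slice, hcl]

lemma pv_slice_from_ne_nil (cl : List Char) (i : Int) (h1 : 1 ≤ i) (h2 : i ≤ cl.length) :
    PySem.List.slice cl (some (-i)) none ≠ [] := by
  intro hnil
  have hlen := congrArg List.length hnil
  simp only [PySem.List.slice, PySem.List.clampIdx, List.length_take, List.length_drop,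
    List.length_nil] at hlen
  split_ifs at hlen <;> omega

lemma pv_slice_both_eq (cl : List Char) (i j : Int) (h1 : 1 ≤ j) (hj : j ≤ i)
    (h2 : i ≤ cl.length) :
    PySem.List.slice cl (some (-i)) (some (-j))
      = (cl.drop (cl.length - i.toNat)).take (i.toNat - j.toNat) := by
  have hi : PySem.List.clampIdx cl.length (-i) = PySem.List.clampIdx cl.length ((cl.length : Int) - i) := by
    simp only [PySem.List.clampIdx]; split_ifs <;> omega
  have hjj : PySem.List.clampIdx cl.length (-j) = PySem.List.clampIdx cl.length ((cl.length : Int) - j) := by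
    simp only [PySem.List.clampIdx]; split_ifs <;> omega
  have h := PySem.List.slice_toNat cl (a := (cl.length : Int) - i) (b := (cl.length : Int) - j) (by omega) (by omega)
  calc PySem.List.slice cl (some (-i)) (some (-j))
      = PySem.List.slice cl (some ((cl.length : Int) - i)) (some ((cl.length : Int) - j)) := by
        simp [PySem.List.slice, hi, hjj]
    _ = (cl.drop ((cl.length : Int) - i).toNat).take
          (((cl.length : Int) - j).toNat - ((cl.length : Int) - i).toNat) := h
    _ = (cl.drop (cl.length - i.toNat)).take (i.toNat - j.toNat) := by
        rw [show ((cl.length : Int) - j).toNat - ((cl.length : Int) - i).toNat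
            = i.toNat - j.toNat from by omega,
          show ((cl.length : Int) - i).toNat = cl.length - i.toNat from by omega]

lemma pv_slice_both_ne_nil (cl : List Char) (i j : Int) (h1 : 1 ≤ j) (hj : j < i)
    (h2 : i ≤ cl.length) :
    PySem.List.slice cl (some (-i)) (some (-j)) ≠ [] := by
  intro hnil
  have hlen := congrArg List.length hnil
  simp only [PySem.List.slice, PySem.List.clampIdx, List.length_take, List.length_drop,
    List.length_nil] at hlen
  split_ifs at hlen <;> omega

-- A's suffix loop folds the flat list of per-candidate greedy match ends into the set
lemma pv_phase1 (t cl : List Char) (s : PySem.Set Int) :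
    (PySem.List.pyRange (cl.length : Int) 0 (-1)).foldl
      (fun fs i => (pvFindLoopA t (PySem.List.slice cl (some (-i)) none)
          (PySem.Chars.count t (PySem.List.slice cl (some (-i)) none)) fs 0).1) s
    = ((PySem.List.pyRange (cl.length : Int) 0 (-1)).flatMap
        (fun i => pvScanEnds t (PySem.List.slice cl (some (-i)) none))).foldl PySem.Set.add s := by
  rw [← pv_foldl_ends]
  apply PySem.List.foldl_congr_mem
  intro fs i hi
  have hb : 1 ≤ i ∧ i ≤ (cl.length : Int) := by
    rw [PySem.List.pyRange_neg_one] at hi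
    simp only [List.mem_map, List.mem_range] at hi
    obtain ⟨k, hk, rfl⟩ := hi
    omega
  exact pv_inner t _ (pv_slice_from_ne_nil cl i hb.1 hb.2) fs

-- same for A's fallback double loop
lemma pv_phase2 (t cl : List Char) (s : PySem.Set Int) :
    (PySem.List.pyRange (cl.length : Int) 1 (-1)).foldl
      (fun fs i =>
        (PySem.List.pyRange 1 (i - 1) 1).foldl
          (fun fs2 j => (pvFindLoopA t (PySem.List.slice cl (some (-i)) (some (-j)))
              (PySem.Chars.count t (PySem.List.slice cl (some (-i)) (some (-j)))) fs2 0).1) fs) s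
    = ((PySem.List.pyRange (cl.length : Int) 1 (-1)).flatMap (fun i =>
          (PySem.List.pyRange 1 (i - 1) 1).flatMap (fun j =>
            pvScanEnds t (PySem.List.slice cl (some (-i)) (some (-j)))))).foldl
        PySem.Set.add s := by
  rw [← pv_foldl_ends]
  apply PySem.List.foldl_congr_mem
  intro fs i hi
  have hb : 2 ≤ i ∧ i ≤ (cl.length : Int) := by
    rw [PySem.List.pyRange_neg_one] at hi
    simp only [List.mem_map, List.mem_range] at hi
    obtain ⟨k, hk, rfl⟩ := hi
    omega
  rw [← pv_foldl_ends]
  apply PySem.List.foldl_congr_mem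
  intro fs2 j hj
  have hjb : 1 ≤ j ∧ j < i := by
    rw [PySem.List.mem_pyRange_one] at hj
    omega
  exact pv_inner t _ (pv_slice_both_ne_nil cl i j hjb.1 hjb.2 hb.2) fs2

-- ---------- B side: table correctness ----------

lemma pvCpl_nil_left (b : List Char) : pvCpl [] b = 0 := by cases b <;> rfl

lemma pvCpl_nil_right (a : List Char) : pvCpl a [] = 0 := by cases a <;> rfl

lemma pv_rowOf_nil (cl : List Char) :
    List.replicate (cl.length + 1) (0 : Nat) = pvRowOf [] cl := by
  unfold pvRowOf
  symm
  rw [List.eq_replicate_iff]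
  constructor
  · simp
  · intro b hb
    simp only [List.mem_map] at hb
    obtain ⟨q, -, rfl⟩ := hb
    simp [pvCpl_nil_left]

lemma pv_rowOf_length (a cl : List Char) : (pvRowOf a cl).length = cl.length + 1 := by
  simp [pvRowOf]

lemma pv_rowOf_getD (a cl : List Char) (q : Nat) (hq : q ≤ cl.length) :
    (pvRowOf a cl).getD q 0 = pvCpl a.reverse ((cl.take q).reverse) := by
  rw [List.getD_eq_getElem _ _ (by rw [pv_rowOf_length]; omega)]
  simp [pvRowOf]

lemma pv_nextRow (cl a : List Char) (ch : Char) :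
    pvNextRow cl (pvRowOf a cl) ch = pvRowOf (a ++ [ch]) cl := by
  apply List.ext_getElem
  · simp [pvNextRow, pvRowOf]
  · intro n h1 h2
    have hn : n < cl.length + 1 := by
      simpa [pv_rowOf_length, pvRowOf] using h2
    match n with
    | 0 =>
      simp [pvNextRow, pvRowOf, pvCpl_nil_right]
    | q + 1 =>
      have hq : q < cl.length := by omega
      have htake : cl.take (q + 1) = cl.take q ++ [cl[q]] := by
        rw [List.take_add_one]
        simp [List.getElem?_eq_getElem hq]
      simp only [pvNextRow, List.getElem_cons_succ, pvRowOf, List.getElem_map,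
        List.getElem_range, List.getElem_zipWith, htake, List.reverse_append,
        List.reverse_cons, List.reverse_nil, List.nil_append, List.cons_append,
        List.reverse_append]
      simp [pvCpl]

lemma pv_scanl_rows (cl : List Char) :
    ∀ (rest a : List Char),
      List.scanl (pvNextRow cl) (pvRowOf a cl) rest
        = (List.range (rest.length + 1)).map (fun e => pvRowOf (a ++ rest.take e) cl) := by
  intro rest
  induction rest with
  | nil => intro a; simp
  | cons x xs ih =>
    intro a
    rw [List.scanl_cons, pv_nextRow, ih (a ++ [x])]
    symm
    rw [List.length_cons, List.range_succ_eq_map]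
    simp [Function.comp_def, List.take_succ_cons, List.append_assoc]

-- ---------- B side: cpl characterises segment equality ----------

lemma pv_cpl_iff (L : Nat) : ∀ (x y : List Char),
    L ≤ pvCpl x y ↔ (L ≤ x.length ∧ L ≤ y.length ∧ x.take L = y.take L) := by
  induction L with
  | zero => intro x y; simp
  | succ L ih =>
    intro x y
    cases x with
    | nil => simp [pvCpl_nil_left]
    | cons a xs =>
      cases y with
      | nil => simp [pvCpl_nil_right]
      | cons b ys =>
        simp only [pvCpl]
        by_cases hab : a = b
        · subst hab
          rw [if_pos rfl]
          constructor
          · intro h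
            have := (ih xs ys).mp (by omega)
            refine ⟨by simp; omega, by simp; omega, ?_⟩
            simp [List.take_succ_cons, this.2.2]
          · intro ⟨h1, h2, h3⟩
            simp only [List.take_succ_cons, List.cons.injEq] at h3
            have := (ih xs ys).mpr ⟨by simpa using h1, by simpa using h2, h3.2⟩
            omega
        · rw [if_neg hab]
          constructor
          · omega
          · intro ⟨h1, h2, h3⟩
            simp only [List.take_succ_cons, List.cons.injEq] at h3
            exact absurd h3.1 hab

lemma pv_prefix_len (t c : List Char) (s : Nat) (h : c.isPrefixOf (t.drop s))
    (hc : c ≠ []) : s + c.length ≤ t.length := by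
  have hp : c <+: t.drop s := List.isPrefixOf_iff_prefix.mp h
  have h1 := hp.length_le
  have hcl : 0 < c.length := List.length_pos_of_ne_nil hc
  simp only [List.length_drop] at h1
  by_cases hs : s ≤ t.length
  · omega
  · exfalso
    rw [List.drop_eq_nil_of_le (by omega)] at h
    simp [List.isPrefixOf_iff_prefix, List.prefix_nil] at h
    exact hc h

-- the table condition is exactly "candidate occurrence ends at e"
lemma pv_cond_iff (t cl : List Char) (L q e : Nat) (hL : 1 ≤ L) (hLq : L ≤ q)
    (hq : q ≤ cl.length) (he : e ≤ t.length) :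
    (L ≤ pvCpl (t.take e).reverse ((cl.take q).reverse))
      ↔ (L ≤ e ∧ ((cl.take q).drop (q - L)).isPrefixOf (t.drop (e - L))) := by
  have hlt : (t.take e).length = e := by simp; omega
  have hlq : (cl.take q).length = q := by simp; omega
  rw [pv_cpl_iff]
  rw [List.length_reverse, List.length_reverse, hlt, hlq]
  constructor
  · intro ⟨h1, h2, h3⟩
    refine ⟨h1, ?_⟩
    rw [List.take_reverse, List.take_reverse] at h3
    have h4 := List.reverse_injective h3
    rw [hlt, hlq] at h4
    rw [List.isPrefixOf_iff_prefix]
    rw [List.drop_take] at h4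
    have h5 : e - (e - L) = L := by omega
    rw [h5] at h4
    rw [← h4]
    exact List.take_prefix _ _
  · intro ⟨h1, h2⟩
    refine ⟨h1, hLq, ?_⟩
    rw [List.take_reverse, List.take_reverse, hlt, hlq]
    congr 1
    rw [List.isPrefixOf_iff_prefix] at h2
    have hclen : ((cl.take q).drop (q - L)).length = L := by simp; omega
    have h4 := List.prefix_iff_eq_take.mp h2
    rw [hclen] at h4
    rw [List.drop_take]
    have h5 : e - (e - L) = L := by omega
    rw [h5, ← h4]

-- ---------- B side: greedy fold = selection recursion ----------

lemma pv_fold_sel (t cl : List Char) (L q : Nat) (hL : 1 ≤ L) (hLq : L ≤ q)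
    (hq : q ≤ cl.length) :
    ∀ (es : List Nat) (acc : List Int) (last : Nat), (∀ e ∈ es, e ≤ t.length) →
      ((es.map (fun (e : Nat) => ((e : Int), pvRowOf (t.take e) cl))).foldl
          (fun (p : List Int × Int) (er : Int × List Nat) =>
            if (L : Int) ≤ er.1 ∧ (L : Int) ≤ ((er.2.getD q 0 : Nat) : Int) ∧ p.2 ≤ er.1 - (L : Int)
            then (p.1 ++ [er.1], er.1) else p)
          (acc, (last : Int))).1
        = acc ++ (pvSel t ((cl.take q).drop (q - L)) L es last).map (fun x => (x : Int)) := by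
  intro es
  induction es with
  | nil => intro acc last _; simp [pvSel]
  | cons e es ih =>
    intro acc last hall
    have he : e ≤ t.length := hall e (List.mem_cons_self ..)
    have hrest : ∀ x ∈ es, x ≤ t.length := fun x hx => hall x (List.mem_cons_of_mem _ hx)
    simp only [List.map_cons, List.foldl_cons]
    have hcond : ((L : Int) ≤ (e : Int) ∧
        (L : Int) ≤ (((pvRowOf (t.take e) cl).getD q 0 : Nat) : Int) ∧
        (last : Int) ≤ (e : Int) - (L : Int))
        ↔ (L ≤ e ∧ ((cl.take q).drop (q - L)).isPrefixOf (t.drop (e - L)) ∧ last ≤ e - L) := by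
      rw [pv_rowOf_getD _ _ _ hq]
      constructor
      · intro ⟨h1, h2, h3⟩
        have hLe : L ≤ e := by exact_mod_cast h1
        have := (pv_cond_iff t cl L q e hL hLq hq he).mp (by exact_mod_cast h2)
        exact ⟨hLe, this.2, by omega⟩
      · intro ⟨h1, h2, h3⟩
        refine ⟨by exact_mod_cast h1, ?_, by omega⟩
        exact_mod_cast (pv_cond_iff t cl L q e hL hLq hq he).mpr ⟨h1, h2⟩
    by_cases hC : L ≤ e ∧ ((cl.take q).drop (q - L)).isPrefixOf (t.drop (e - L)) ∧ last ≤ e - L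
    · rw [if_pos (hcond.mpr hC)]
      simp only [pvSel, if_pos hC]
      rw [ih (acc ++ [(e : Int)]) e hrest]
      simp
    · rw [if_neg (fun h => hC (hcond.mp h))]
      simp only [pvSel, if_neg hC]
      exact ih acc last hrest

-- ---------- B side: selection = greedy scan ----------

lemma pv_scan_eq_nil (c : List Char) :
    ∀ (fuel : Nat) (t : List Char) (pos : Nat),
      (∀ s, pos ≤ s → ¬ c.isPrefixOf (t.drop s)) → pvScanGo c fuel (t.drop pos) pos = [] := by
  intro fuel
  induction fuel with
  | zero => intro t pos _; simp [pvScanGo]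
  | succ f ih =>
    intro t pos h
    cases hrest : t.drop pos with
    | nil => simp [pvScanGo]
    | cons x tt =>
      simp only [pvScanGo]
      rw [if_neg (by rw [← hrest]; exact h pos le_rfl)]
      have htt : tt = t.drop (pos + 1) := by
        have h2 : (t.drop pos).tail = t.drop (pos + 1) := List.tail_drop
        rw [hrest] at h2
        simpa using h2
      rw [htt]
      exact ih t (pos + 1) (fun s hs => h s (by omega))

lemma pv_scan_nil_rest (c : List Char) (fuel pos : Nat) : pvScanGo c fuel [] pos = [] := by
  cases fuel <;> simp [pvScanGo]

lemma pv_scan_skip (t c : List Char) (_hc : c ≠ []) :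
    ∀ (d pos s0 : Nat), s0 - pos = d → pos ≤ s0 →
      (∀ s, pos ≤ s → s < s0 → ¬ c.isPrefixOf (t.drop s)) →
      pvScanGo c (t.length - pos) (t.drop pos) pos
        = pvScanGo c (t.length - s0) (t.drop s0) s0 := by
  intro d
  induction d with
  | zero =>
    intro pos s0 hd hle _
    have : pos = s0 := by omega
    subst this; rfl
  | succ k ih =>
    intro pos s0 hd hle hno
    have hlt : pos < s0 := by omega
    cases hrest : t.drop pos with
    | nil =>
      have hlen : t.length ≤ pos := by
        have := congrArg List.length hrest
        simp [List.length_drop] at this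
        omega
      rw [List.drop_eq_nil_of_le (by omega : t.length ≤ s0)]
      rw [pv_scan_nil_rest, pv_scan_nil_rest]
    | cons x tt =>
      have hpos : pos < t.length := by
        by_contra hcon
        rw [List.drop_eq_nil_of_le (by omega)] at hrest
        exact absurd hrest (by simp)
      rw [show t.length - pos = (t.length - (pos + 1)) + 1 by omega]
      simp only [pvScanGo]
      rw [if_neg (hrest ▸ hno pos le_rfl hlt)]
      have htt : tt = t.drop (pos + 1) := by
        have h2 : (t.drop pos).tail = t.drop (pos + 1) := List.tail_drop
        rw [hrest] at h2
        simpa using h2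
      rw [htt]
      exact ih (pos + 1) s0 (by omega) (by omega) (fun s hs => hno s (by omega))

lemma pv_scan_step (t c : List Char) (hc : c ≠ []) (s0 : Nat)
    (h : c.isPrefixOf (t.drop s0)) :
    pvScanGo c (t.length - s0) (t.drop s0) s0
      = (s0 + c.length) :: pvScanGo c (t.length - (s0 + c.length))
          (t.drop (s0 + c.length)) (s0 + c.length) := by
  have hcl : 0 < c.length := List.length_pos_of_ne_nil hc
  have hfit : s0 + c.length ≤ t.length := pv_prefix_len t c s0 h hc
  cases hrest : t.drop s0 with
  | nil =>
    rw [hrest] at h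
    simp [List.isPrefixOf_iff_prefix, List.prefix_nil] at h
    exact absurd h hc
  | cons x tt =>
    rw [show t.length - s0 = (t.length - s0 - 1) + 1 by omega]
    simp only [pvScanGo]
    rw [if_pos (hrest ▸ h)]
    rw [← hrest, List.drop_drop]
    congr 1
    apply pvScanGo_fuel c hc
    · simp only [List.length_drop]; omega
    · simp [List.length_drop]

lemma pv_sel_scan (t c : List Char) (hc : c ≠ []) :
    ∀ (k lo last : Nat), lo + k = t.length + 1 →
      (∀ s, last ≤ s → s + c.length < lo → ¬ c.isPrefixOf (t.drop s)) →
      pvSel t c c.length (List.range' lo k) last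
        = pvScanGo c (t.length - last) (t.drop last) last := by
  have hcl : 0 < c.length := List.length_pos_of_ne_nil hc
  intro k
  induction k with
  | zero =>
    intro lo last hk H
    simp only [List.range', pvSel]
    symm
    have : ∀ s, last ≤ s → ¬ c.isPrefixOf (t.drop s) := by
      intro s hs hpre
      have hfit := pv_prefix_len t c s hpre hc
      exact H s hs (by omega) hpre
    calc pvScanGo c (t.length - last) (t.drop last) last
        = [] := pv_scan_eq_nil c (t.length - last) t last this
  | succ k ih =>
    intro lo last hk H
    rw [List.range'_succ]
    simp only [pvSel]
    by_cases hC : c.length ≤ lo ∧ c.isPrefixOf (t.drop (lo - c.length)) ∧ last ≤ lo - c.length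
    · rw [if_pos hC]
      obtain ⟨hLlo, hpre, hlast⟩ := hC
      set s0 := lo - c.length with hs0
      have hskip : pvScanGo c (t.length - last) (t.drop last) last
          = pvScanGo c (t.length - s0) (t.drop s0) s0 := by
        apply pv_scan_skip t c hc (s0 - last) last s0 rfl hlast
        intro s hs1 hs2
        exact H s hs1 (by omega)
      rw [hskip, pv_scan_step t c hc s0 hpre]
      have hlo : s0 + c.length = lo := by omega
      rw [hlo]
      congr 1
      rw [ih (lo + 1) lo (by omega)]
      intro s hs1 hs2 hpre2
      omega
    · rw [if_neg hC]
      apply ih (lo + 1) last (by omega)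
      intro s hs1 hs2
      by_cases hslt : s + c.length < lo
      · exact H s hs1 hslt
      · have hseq : s + c.length = lo := by omega
        intro hpre
        apply hC
        refine ⟨by omega, ?_, by omega⟩
        rw [show lo - c.length = s by omega]
        exact hpre

-- ---------- B side: pvGreedy computes the greedy scan ends ----------

lemma pv_enum_map_range {α : Type} (f : Nat → α) :
    ∀ (k s : Nat), PySem.List.enumerate ((List.range' s k).map f) (s : Int)
      = (List.range' s k).map (fun (e : Nat) => ((e : Int), f e)) := by
  intro k
  induction k with
  | zero => intro s; simp [PySem.List.enumerate_nil]
  | succ k ih =>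
    intro s
    rw [List.range'_succ]
    simp only [List.map_cons, PySem.List.enumerate_cons]
    rw [show (s : Int) + 1 = ((s + 1 : Nat) : Int) by push_cast; ring, ih (s + 1)]

lemma pv_key (t cl : List Char) (L q : Nat) (hL : 1 ≤ L) (hLq : L ≤ q) (hq : q ≤ cl.length) :
    pvGreedy (List.scanl (pvNextRow cl) (List.replicate (cl.length + 1) 0) t) L q
      = pvScanEnds t ((cl.take q).drop (q - L)) := by
  have hclen : ((cl.take q).drop (q - L)).length = L := by simp; omega
  have hcne : (cl.take q).drop (q - L) ≠ [] := by
    intro h; rw [h] at hclen; simp at hclen; omega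
  unfold pvGreedy
  rw [pv_rowOf_nil, pv_scanl_rows, List.range_eq_range']
  have h0 : ((List.range' 0 (t.length + 1)).map (fun e => pvRowOf ([] ++ t.take e) cl))
      = ((List.range' 0 (t.length + 1)).map (fun e => pvRowOf (t.take e) cl)) := by simp
  rw [h0]
  have henum := pv_enum_map_range (fun e => pvRowOf (t.take e) cl) (t.length + 1) 0
  simp only [Nat.cast_zero] at henum
  rw [henum]
  have hfold := pv_fold_sel t cl L q hL hLq hq (List.range' 0 (t.length + 1)) [] 0
    (by intro e he; rw [List.mem_range'] at he; omega)
  simp only [Nat.cast_zero] at hfold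
  rw [hfold]
  set c := (cl.take q).drop (q - L) with hc
  rw [show L = c.length from hclen.symm]
  rw [pv_sel_scan t c hcne (t.length + 1) 0 0 (by omega) (by intro s _ hs; omega)]
  simp [pvScanEnds]

-- per phase-1 candidate: B's table scan = the greedy match ends of A's slice
lemma pv_greedy1 (t cl : List Char) (i : Int) (h1 : 1 ≤ i) (h2 : i ≤ cl.length) :
    pvGreedy (List.scanl (pvNextRow cl) (List.replicate (cl.length + 1) 0) t) i.toNat cl.length
      = pvScanEnds t (PySem.List.slice cl (some (-i)) none) := by
  rw [pv_key t cl i.toNat cl.length (by omega) (by omega) le_rfl]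
  rw [pv_slice_from_eq cl i h1 h2]
  rw [List.take_length]

-- per fallback candidate: same for the two-sided slice
lemma pv_greedy2 (t cl : List Char) (i j : Int) (h1 : 1 ≤ j) (h2 : j + 2 ≤ i)
    (h3 : i ≤ cl.length) :
    pvGreedy (List.scanl (pvNextRow cl) (List.replicate (cl.length + 1) 0) t)
        (i - j).toNat ((cl.length : Int) - j).toNat
      = pvScanEnds t (PySem.List.slice cl (some (-i)) (some (-j))) := by
  rw [pv_key t cl (i - j).toNat ((cl.length : Int) - j).toNat (by omega) (by omega) (by omega)]
  rw [pv_slice_both_eq cl i j h1 (by omega) h3]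
  rw [List.drop_take]
  rw [show ((cl.length : Int) - j).toNat - (i - j).toNat = cl.length - i.toNat from by omega,
    show ((cl.length : Int) - j).toNat - (cl.length - i.toNat) = i.toNat - j.toNat from by omega]

-- ===== VERDICT (by name: the statement is the Claim_ definition above) =====
theorem get_focus_left_indices_spec : Claim_equal_get_focus_left_indices := by
  intro transcript context_l _hdom
  unfold Spec_get_focus_left_indices
  simp only [get_focus_left_indices, get_focus_left_indices_alt]
  rw [pv_phase1]
  set t := transcript.toList
  set cl := context_l.toList
  have hrows : (PySem.List.pyRange (cl.length : Int) 0 (-1)).flatMap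
        (fun i => pvGreedy (List.scanl (pvNextRow cl) (List.replicate (cl.length + 1) 0) t)
          i.toNat cl.length)
      = (PySem.List.pyRange (cl.length : Int) 0 (-1)).flatMap
        (fun i => pvScanEnds t (PySem.List.slice cl (some (-i)) none)) := by
    apply pv_flatMap_congr
    intro i hi
    have hb : 1 ≤ i ∧ i ≤ (cl.length : Int) := by
      rw [PySem.List.pyRange_neg_one] at hi
      simp only [List.mem_map, List.mem_range] at hi
      obtain ⟨k, hk, rfl⟩ := hi
      omega
    exact pv_greedy1 t cl i hb.1 hb.2
  rw [hrows]
  set ends1 := (PySem.List.pyRange (cl.length : Int) 0 (-1)).flatMap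
      (fun i => pvScanEnds t (PySem.List.slice cl (some (-i)) none)) with hends1
  have hiff : (List.foldl PySem.Set.add PySem.Set.empty ends1).isEmpty = ends1.isEmpty := by
    by_cases h : ends1 = []
    · rw [h]; rfl
    · have h1 : List.foldl PySem.Set.add ([] : PySem.Set Int) ends1 ≠ [] :=
        fun hh => h ((pv_ofList_eq_nil_iff _).mp hh)
      rw [Bool.eq_iff_iff]
      simp [List.isEmpty_iff, h, h1, PySem.Set.empty]
  rw [hiff]
  by_cases hE : ends1.isEmpty = true
  · rw [if_pos hE, if_pos hE]
    have hnil : ends1 = [] := List.isEmpty_iff.mp hE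
    rw [hnil, List.foldl_nil, pv_phase2]
    have hrows2 : (PySem.List.pyRange (cl.length : Int) 1 (-1)).flatMap (fun i =>
          (PySem.List.pyRange 1 (i - 1) 1).flatMap (fun j =>
            pvGreedy (List.scanl (pvNextRow cl) (List.replicate (cl.length + 1) 0) t)
              (i - j).toNat ((cl.length : Int) - j).toNat))
        = (PySem.List.pyRange (cl.length : Int) 1 (-1)).flatMap (fun i =>
          (PySem.List.pyRange 1 (i - 1) 1).flatMap (fun j =>
            pvScanEnds t (PySem.List.slice cl (some (-i)) (some (-j))))) := by
      apply pv_flatMap_congr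
      intro i hi
      have hb : 2 ≤ i ∧ i ≤ (cl.length : Int) := by
        rw [PySem.List.pyRange_neg_one] at hi
        simp only [List.mem_map, List.mem_range] at hi
        obtain ⟨k, hk, rfl⟩ := hi
        omega
      apply pv_flatMap_congr
      intro j hj
      have hjb : 1 ≤ j ∧ j + 2 ≤ i := by
        rw [PySem.List.mem_pyRange_one] at hj
        omega
      exact pv_greedy2 t cl i j hjb.1 hjb.2 hb.2
    rw [hrows2]
    rw [PySem.Set.ofList_eq_foldl, List.foldl_append, List.foldl_cons, List.foldl_nil]
    rfl
  · rw [if_neg hE, if_neg hE]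
    rw [PySem.Set.ofList_eq_foldl, List.foldl_append, List.foldl_cons, List.foldl_nil]
    rfl
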